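-- pv_equiv track=rewrite | github.com/mate-academy/python_morning_tasks | task_list/python_reformat_the_string/reference/reformat_the_string.py | reformat_string
-- ===== SOURCE A (Python) =====
-- def reformat_string(input_string: str) -> str:
--     letters = [char for char in input_string if char.isalpha()]
--     digits = [char for char in input_string if char.isdigit()]
--
--     if abs(len(letters) - len(digits)) > 1:
--         return ""
--
--     result_string = ""
--     condition_flag = len(letters) > len(digits)
--
--     while letters or digits:
--         next_symbol = letters.pop() if condition_flag else digits.pop()
--         result_string += next_symbol
--         condition_flag = not condition_flag
--
--     return result_string
-- ===== SOURCE B (Python) =====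
-- def reformat_string(input_string: str) -> str:
--     letters = [char for char in input_string if char.isalpha()]
--     digits = [char for char in input_string if char.isdigit()]
--
--     if abs(len(letters) - len(digits)) > 1:
--         return ""
--
--     a, b = (letters, digits) if len(letters) > len(digits) else (digits, letters)
--     out = "".join(x + y for x, y in zip(reversed(a), reversed(b)))
--     if len(a) > len(b):
--         out += a[0]
--     return out
-- ===== Notes on version B (the rewrite author's own statement) =====
-- stated objective: idiomatic
-- what changed: Replaces the toggling pop()/while loop with flag state by a declarative build: pick the start group (longer wins, tie goes to digits), join pairs from zip(reversed(a), reversed(b)), and append a's remaining first character when a is longer.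
import Mathlib
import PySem

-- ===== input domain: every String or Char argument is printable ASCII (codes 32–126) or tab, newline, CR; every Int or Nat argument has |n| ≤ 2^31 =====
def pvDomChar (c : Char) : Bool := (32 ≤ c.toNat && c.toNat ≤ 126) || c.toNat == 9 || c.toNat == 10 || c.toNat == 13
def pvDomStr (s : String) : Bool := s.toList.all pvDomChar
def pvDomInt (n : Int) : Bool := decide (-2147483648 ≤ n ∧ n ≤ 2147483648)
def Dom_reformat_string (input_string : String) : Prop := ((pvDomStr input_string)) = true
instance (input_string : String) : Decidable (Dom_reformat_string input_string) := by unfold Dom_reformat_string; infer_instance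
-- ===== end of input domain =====

-- B replaces A's toggling pop/while loop by a paired zip-of-reversed-halves join (idiomatic decomposition); same results.

-- ===== PORT A =====
-- A's while loop: pop() from the end of letters or digits according to the toggling flag,
-- appending to result_string.  list.pop() = getLast?/dropLast; the none branch is Python's
-- IndexError, unreachable after the abs-difference guard (loop state keeps the popped list nonempty).
def reformatLoopA (letters digits : List Char) (flag : Bool) (acc : List Char) : List Char :=
  if letters = [] ∧ digits = [] then acc
  else
    match flag with
    | true =>
      match h : letters.getLast? with
      | none => acc   -- Python would raise IndexError here; unreachable under the guard
      | some c => reformatLoopA letters.dropLast digits false (acc ++ [c])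
    | false =>
      match h : digits.getLast? with
      | none => acc
      | some c => reformatLoopA letters digits.dropLast true (acc ++ [c])
termination_by letters.length + digits.length
decreasing_by
  · have : letters ≠ [] := by intro h'; simp [h'] at h
    have := List.length_pos_of_ne_nil this
    simp [List.length_dropLast]; omega
  · have : digits ≠ [] := by intro h'; simp [h'] at h
    have := List.length_pos_of_ne_nil this
    simp [List.length_dropLast]; omega

def reformat_string (input_string : String) : String :=
  let letters := input_string.toList.filter (fun c => PySem.Chars.isalpha c)
  let digits := input_string.toList.filter (fun c => PySem.Chars.isdigit c)
  if ((letters.length : Int) - (digits.length : Int)).natAbs > 1 then ""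
  else
    String.mk (reformatLoopA letters digits (decide (letters.length > digits.length)) [])

-- ===== PORT B =====
def reformat_string_alt (input_string : String) : String :=
  let letters := input_string.toList.filter (fun c => PySem.Chars.isalpha c)
  let digits := input_string.toList.filter (fun c => PySem.Chars.isdigit c)
  if ((letters.length : Int) - (digits.length : Int)).natAbs > 1 then ""
  else
    let ab := if letters.length > digits.length then (letters, digits) else (digits, letters)
    let out := ((ab.1.reverse.zip ab.2.reverse).map (fun p => [p.1, p.2])).flatten
    String.mk (if ab.1.length > ab.2.length then out ++ [ab.1.headI] else out)  -- a[0] = headI (a nonempty here)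

-- ===== PRECONDITION & SPEC =====
def Spec_reformat_string (input_string : String) (out : String) : Prop := out = reformat_string_alt input_string
instance (input_string : String) (out : String) : Decidable (Spec_reformat_string input_string out) := by unfold Spec_reformat_string; infer_instance

-- ===== CLAIM (what is proved, stated in full; the proofs are below) =====
def Claim_equal_reformat_string : Prop := ∀ (input_string : String), Dom_reformat_string input_string → Spec_reformat_string input_string (reformat_string input_string)

-- ===== LEMMAS AND PROOFS =====

-- alternating interleave, starting with the first list
def itl : List Char → List Char → List Char
  | [], _ => []
  | x :: xs, ys => x :: itl ys xs
termination_by a b => a.length + b.length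
decreasing_by simp; omega

lemma itl_cons_cons (x y : Char) (xs ys : List Char) :
    itl (x :: xs) (y :: ys) = x :: y :: itl xs ys := by
  rw [itl, itl]

lemma itl_eq_zip : ∀ (Y X : List Char), X.length = Y.length →
    itl X Y = ((X.zip Y).map (fun p => [p.1, p.2])).flatten := by
  intro Y
  induction Y with
  | nil => intro X h; cases X <;> simp_all [itl]
  | cons y ys ih =>
      intro X h
      cases X with
      | nil => simp at h
      | cons x xs =>
          rw [itl_cons_cons]
          have := ih xs (by simpa using h)
          simp [this]

lemma itl_eq_zip_succ : ∀ (Y X : List Char) (x : Char), X.length = Y.length →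
    itl (X ++ [x]) Y = (((X ++ [x]).zip Y).map (fun p => [p.1, p.2])).flatten ++ [x] := by
  intro Y
  induction Y with
  | nil =>
      intro X x h
      have : X = [] := List.eq_nil_of_length_eq_zero (by simpa using h)
      subst this
      simp [itl]
  | cons y ys ih =>
      intro X x h
      cases X with
      | nil => simp at h
      | cons x0 xs =>
          rw [List.cons_append, itl_cons_cons]
          have := ih xs x (by simpa using h)
          simp [this]

-- the toggling loop of A, characterised as the alternating interleave of the reversed halves
lemma loopA_spec : ∀ (n : ℕ) (L D acc : List Char), L.length + D.length ≤ n →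
    ((L.length = D.length ∨ L.length = D.length + 1) →
        reformatLoopA L D true acc = acc ++ itl L.reverse D.reverse)
    ∧ ((D.length = L.length ∨ D.length = L.length + 1) →
        reformatLoopA L D false acc = acc ++ itl D.reverse L.reverse) := by
  intro n
  induction n with
  | zero =>
      intro L D acc h
      have hL : L = [] := by cases L <;> simp_all
      have hD : D = [] := by cases D <;> simp_all
      subst hL; subst hD
      constructor <;> intro _ <;> simp [reformatLoopA, itl]
  | succ n ih =>
      intro L D acc h
      constructor
      · intro hlen
        by_cases hB : L = [] ∧ D = []
        · rw [reformatLoopA, if_pos hB]; simp [hB.1, hB.2, itl]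
        · have hLne : L ≠ [] := by
            intro h'
            have : D = [] := by
              rcases hlen with h1 | h1
              · exact List.eq_nil_of_length_eq_zero (by simp [h'] at h1; omega)
              · simp [h'] at h1
            exact hB ⟨h', this⟩
          obtain ⟨L', c, hsnoc⟩ := (List.eq_nil_or_concat L).resolve_left hLne
          subst hsnoc
          have hlen' : L'.length + 1 = (L' ++ [c]).length := by simp
          rw [reformatLoopA, if_neg hB]
          split
          · next hG => simp at hG
          · next c' hG =>
              simp at hG
              subst hG
              have hrec := (ih L' D (acc ++ [c]) (by simp at h ⊢; omega)).2
                (by rcases hlen with h1 | h1 <;> simp at h1 ⊢ <;> omega)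
              rw [show (L'.concat c).dropLast = L' by simp]
              rw [hrec]
              have hrev : (L'.concat c).reverse = c :: L'.reverse := by simp
              rw [hrev, itl]
              simp
      · intro hlen
        by_cases hB : L = [] ∧ D = []
        · rw [reformatLoopA, if_pos hB]; simp [hB.1, hB.2, itl]
        · have hDne : D ≠ [] := by
            intro h'
            have : L = [] := by
              rcases hlen with h1 | h1
              · exact List.eq_nil_of_length_eq_zero (by simp [h'] at h1; omega)
              · simp [h'] at h1
            exact hB ⟨this, h'⟩
          obtain ⟨D', c, hsnoc⟩ := (List.eq_nil_or_concat D).resolve_left hDne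
          subst hsnoc
          have hlen' : D'.length + 1 = (D' ++ [c]).length := by simp
          rw [reformatLoopA, if_neg hB]
          split
          · next hG => simp at hG
          · next c' hG =>
              simp at hG
              subst hG
              have hrec := (ih L D' (acc ++ [c]) (by simp at h ⊢; omega)).1
                (by rcases hlen with h1 | h1 <;> simp at h1 ⊢ <;> omega)
              rw [show (D'.concat c).dropLast = D' by simp]
              rw [hrec]
              have hrev : (D'.concat c).reverse = c :: D'.reverse := by simp
              rw [hrev, itl]
              simp

-- ===== VERDICT (by name: the statement is the Claim_ definition above) =====
theorem reformat_string_spec : Claim_equal_reformat_string := by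
  intro s _
  unfold Spec_reformat_string reformat_string reformat_string_alt
  set L := s.toList.filter (fun c => PySem.Chars.isalpha c) with hL
  set D := s.toList.filter (fun c => PySem.Chars.isdigit c) with hD
  by_cases hg : ((L.length : Int) - (D.length : Int)).natAbs > 1
  · simp [hg]
  · simp only [if_neg hg]
    rcases (by omega :
        L.length = D.length ∨ L.length = D.length + 1 ∨ D.length = L.length + 1) with he | hgt | hlt
    · -- equal lengths: flag is false, B starts with digits, no leftover
      have hflag : (decide (L.length > D.length)) = false := by simp [he]
      rw [hflag]
      rw [(loopA_spec (L.length + D.length) L D [] le_rfl).2 (Or.inl he.symm)]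
      have hngt : ¬ L.length > D.length := by omega
      rw [if_neg hngt]
      have hngt' : ¬ D.length > L.length := by omega
      simp only [if_neg hngt']
      rw [itl_eq_zip L.reverse D.reverse (by simp [he])]
      simp
    · -- letters one longer: flag is true, B starts with letters and appends letters[0]
      have hflag : (decide (L.length > D.length)) = true := by simp; omega
      rw [hflag]
      rw [(loopA_spec (L.length + D.length) L D [] le_rfl).1 (Or.inr hgt)]
      have hgt' : L.length > D.length := by omega
      rw [if_pos hgt']
      simp only [if_pos hgt']
      obtain ⟨c, L', hc⟩ := List.exists_cons_of_ne_nil (List.ne_nil_of_length_pos (show 0 < L.length by omega))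
      have hrev : L.reverse = L'.reverse ++ [c] := by simp [hc]
      rw [hrev, itl_eq_zip_succ D.reverse L'.reverse c (by simp [hc] at hgt ⊢; omega)]
      simp [hc]
    · -- digits one longer: flag is false, B starts with digits and appends digits[0]
      have hflag : (decide (L.length > D.length)) = false := by simp; omega
      rw [hflag]
      rw [(loopA_spec (L.length + D.length) L D [] le_rfl).2 (Or.inr hlt)]
      have hngt : ¬ L.length > D.length := by omega
      rw [if_neg hngt]
      have hgt' : D.length > L.length := by omega
      simp only [if_pos hgt']
      obtain ⟨c, D', hc⟩ := List.exists_cons_of_ne_nil (List.ne_nil_of_length_pos (show 0 < D.length by omega))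
      have hrev : D.reverse = D'.reverse ++ [c] := by simp [hc]
      rw [hrev, itl_eq_zip_succ L.reverse D'.reverse c (by simp [hc] at hlt ⊢; omega)]
      simp [hc]
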